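-- pv_equiv track=rewrite | github.com/peterhurford/when_tai | library.py | numerize
-- ===== SOURCE A (Python) =====
-- def numerize(oom_num):
--     oom_num = int(oom_num)
--     ooms = ['thousand', 'million', 'billion', 'trillion', 'quadrillion', 'quintillion', 'sextillion', 'septillion', 'octillion', 'nonillion', 'decillion']
--
--     if oom_num == 0:
--         return 'one'
--     elif oom_num == 1:
--         return 'ten'
--     elif oom_num == 2:
--         return 'hundred'
--     elif oom_num > 35:
--         return numerize(oom_num - 33) + ' decillion'
--     elif oom_num < 0:
--         return numerize(-oom_num) + 'th'
--     elif oom_num % 3 == 0: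
--         return 'one ' + ooms[(oom_num // 3) - 1]
--     else:
--         return str(10 ** (oom_num % 3)) + ' ' + ooms[(oom_num // 3) - 1]
-- ===== SOURCE B (Python) =====
-- OOMS = ['thousand', 'million', 'billion', 'trillion', 'quadrillion',
--         'quintillion', 'sextillion', 'septillion', 'octillion',
--         'nonillion', 'decillion']
--
--
-- def _base(n):
--     # n is 0..35 here
--     if n == 0:
--         return 'one'
--     if n == 1:
--         return 'ten'
--     if n == 2:
--         return 'hundred'
--     if n % 3 == 0:
--         return 'one ' + OOMS[n // 3 - 1]
--     return str(10 ** (n % 3)) + ' ' + OOMS[n // 3 - 1]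
--
--
-- def _positive(n):
--     tail = ''
--     while n > 35:
--         n -= 33
--         tail += ' decillion'
--     return _base(n) + tail
--
--
-- def numerize(oom_num):
--     oom_num = int(oom_num)
--     if oom_num < 0:
--         return _positive(-oom_num) + 'th'
--     return _positive(oom_num)
-- ===== Notes on version B (the rewrite author's own statement) =====
-- stated objective: simpler
-- what changed: Replaces A's self-recursion (subtract-33 recursion for large magnitudes and recursion through negation for the 'th' suffix) by an iterative decomposition: a while loop that accumulates ' decillion' pieces, a small non-recursive base-word helper, and a top-level sign wrapper.
import Mathlib
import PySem

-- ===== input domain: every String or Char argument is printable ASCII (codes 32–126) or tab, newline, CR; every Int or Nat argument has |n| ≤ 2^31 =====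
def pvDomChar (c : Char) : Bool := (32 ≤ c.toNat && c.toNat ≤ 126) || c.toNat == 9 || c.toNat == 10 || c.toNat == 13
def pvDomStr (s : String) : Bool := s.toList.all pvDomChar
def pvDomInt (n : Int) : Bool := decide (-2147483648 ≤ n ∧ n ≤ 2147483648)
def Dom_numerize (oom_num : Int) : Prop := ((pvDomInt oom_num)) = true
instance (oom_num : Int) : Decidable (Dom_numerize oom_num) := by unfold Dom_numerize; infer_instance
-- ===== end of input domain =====

-- B replaces A's self-recursion by an iterative loop + small helpers (simpler, O(1) stack); return values agree on Pre_.

-- shared constant: the Python list 'ooms' / 'OOMS'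
def pvOoms : List String :=
  ["thousand", "million", "billion", "trillion", "quadrillion",
   "quintillion", "sextillion", "septillion", "octillion",
   "nonillion", "decillion"]

-- ===== PORT A =====
def numerize (oom_num : Int) : String :=
  if oom_num = 0 then "one"
  else if oom_num = 1 then "ten"
  else if oom_num = 2 then "hundred"
  else if oom_num > 35 then numerize (oom_num - 33) ++ " decillion"
  else if oom_num < 0 then numerize (-oom_num) ++ "th"
  else if PySem.Int.mod oom_num 3 = 0 then
    "one " ++ (PySem.List.pyGet? pvOoms (PySem.Int.floordiv oom_num 3 - 1)).getD ""
  else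
    PySem.Int.toStr ((10 : Int) ^ (PySem.Int.mod oom_num 3).toNat) ++ " " ++
      (PySem.List.pyGet? pvOoms (PySem.Int.floordiv oom_num 3 - 1)).getD ""
termination_by 2 * oom_num.natAbs + (if oom_num < 0 then 1 else 0)
decreasing_by
  · split_ifs <;> omega
  · split_ifs <;> omega

-- ===== PORT B =====
-- helper _base(n): the base word for 0 ≤ n ≤ 35 (no recursion)
def pvBase (n : Int) : String :=
  if n = 0 then "one"
  else if n = 1 then "ten"
  else if n = 2 then "hundred"
  else if PySem.Int.mod n 3 = 0 then
    "one " ++ (PySem.List.pyGet? pvOoms (PySem.Int.floordiv n 3 - 1)).getD ""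
  else
    PySem.Int.toStr ((10 : Int) ^ (PySem.Int.mod n 3).toNat) ++ " " ++
      (PySem.List.pyGet? pvOoms (PySem.Int.floordiv n 3 - 1)).getD ""

-- helper _positive(n): the while loop, accumulating ' decillion' into tail
def pvPositive (n : Int) (tail : String) : String :=
  if n > 35 then pvPositive (n - 33) (tail ++ " decillion")
  else pvBase n ++ tail
termination_by n.natAbs
decreasing_by omega

def numerize_alt (oom_num : Int) : String :=
  if oom_num < 0 then pvPositive (-oom_num) "" ++ "th"
  else pvPositive oom_num ""

-- ===== PRECONDITION & SPEC =====
-- Pre_ excludes magnitudes large enough that A's self-recursion exceeds CPython's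
-- recursion limit and raises RecursionError; the bound is slightly conservative
-- because the exact boundary depends on interpreter stack state.
def Pre_numerize (oom_num : Int) : Prop := -32000 ≤ oom_num ∧ oom_num ≤ 32000
instance (oom_num : Int) : Decidable (Pre_numerize oom_num) := by unfold Pre_numerize; infer_instance
def pvWitness_numerize : Int := (40)

def Spec_numerize (oom_num : Int) (out : String) : Prop := out = numerize_alt oom_num
instance (oom_num : Int) (out : String) : Decidable (Spec_numerize oom_num out) := by unfold Spec_numerize; infer_instance

-- ===== CLAIM (what is proved, stated in full; the proofs are below) =====
def Claim_equal_numerize : Prop := ∀ (oom_num : Int), Dom_numerize oom_num → Pre_numerize oom_num → Spec_numerize oom_num (numerize oom_num)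

-- ===== LEMMAS AND PROOFS =====

-- appending one ' decillion' to the accumulator commutes out of the loop
theorem pvPositive_tail (n : Int) (t : String) :
    pvPositive n (t ++ " decillion") = pvPositive n t ++ " decillion" := by
  by_cases h : n > 35
  · rw [pvPositive, if_pos h, pvPositive_tail (n - 33) (t ++ " decillion")]
    conv_rhs => rw [pvPositive, if_pos h]
  · rw [pvPositive, if_neg h, pvPositive, if_neg h, String.append_assoc]
termination_by n.natAbs
decreasing_by omega

-- A equals B's loop on nonnegative inputs
theorem numerize_eq_pvPositive (n : Int) (hn : 0 ≤ n) :
    numerize n = pvPositive n "" := by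
  by_cases h : n > 35
  · have h0 : ¬ n = 0 := by omega
    have h1 : ¬ n = 1 := by omega
    have h2 : ¬ n = 2 := by omega
    rw [numerize, if_neg h0, if_neg h1, if_neg h2, if_pos h,
        numerize_eq_pvPositive (n - 33) (by omega)]
    calc pvPositive (n - 33) "" ++ " decillion"
        = pvPositive (n - 33) ("" ++ " decillion") := (pvPositive_tail _ _).symm
      _ = pvPositive n "" := by conv_rhs => rw [pvPositive, if_pos h]
  · rw [pvPositive, if_neg h, numerize, pvBase]
    have hneg : ¬ n < 0 := by omega
    by_cases h0 : n = 0
    · simp [h0]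
    by_cases h1 : n = 1
    · simp [h1]
    by_cases h2 : n = 2
    · simp [h2]
    simp only [if_neg h0, if_neg h1, if_neg h2, if_neg h, if_neg hneg]
    split_ifs <;> simp [String.append_assoc]
termination_by n.natAbs
decreasing_by omega

-- ===== VERDICT (by name: the statement is the Claim_ definition above) =====
theorem numerize_spec : Claim_equal_numerize := by
  intro n _ _
  unfold Spec_numerize numerize_alt
  by_cases hneg : n < 0
  · rw [if_pos hneg, ← numerize_eq_pvPositive (-n) (by omega)]
    have h0 : ¬ n = 0 := by omega
    have h1 : ¬ n = 1 := by omega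
    have h2 : ¬ n = 2 := by omega
    have h35 : ¬ n > 35 := by omega
    rw [numerize, if_neg h0, if_neg h1, if_neg h2, if_neg h35, if_pos hneg]
  · rw [if_neg hneg, numerize_eq_pvPositive n (by omega)]
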